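-- pv_equiv track=rewrite | github.com/kite-mo/backjoon_code_practice | 1차 공부/3월/week2/day6/17144번： 미세먼지 안녕!/17144.py | blow_aircleaning
-- ===== SOURCE A (Python) =====
-- def blow_aircleaning(R, C, clean_machine_index_list, room_array):
--     top = clean_machine_index_list[0]
--     bottom = clean_machine_index_list[1]
--
--     # 반시계
--     ## 위 -> 아래
--     for d in range(top-1, 0, -1):
--         room_array[d][0] = room_array[d-1][0]
--     ## 오 -> 왼
--     for l in range(C-1):
--         room_array[0][l] = room_array[0][l+1]
--     ## 아래 -> 위
--     for u in range(0, top):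
--         room_array[u][C-1] = room_array[u+1][C-1]
--     ## 왼 -> 오
--     for r in range(C-1, 1, -1):
--         room_array[top][r] = room_array[top][r-1]
--     room_array[top][1] = 0
--
--     # 시계
--     ## 아래 -> 위
--     for u in range(bottom+1, R-1):
--         room_array[u][0] = room_array[u+1][0]
--     ## 오 -> 왼
--     for l in range(C-1):
--         room_array[R-1][l] = room_array[R-1][l+1]
--     # 위 -> 아래
--     for d in range(R-1, bottom, -1):
--         room_array[d][C-1] = room_array[d-1][C-1]
--     ## 왼 -> 오
--     for r in range(C-1, 1, -1):
--         room_array[bottom][r] = room_array[bottom][r-1]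
--     room_array[bottom][1] = 0
--
--     return room_array
-- ===== SOURCE B (Python) =====
-- # B: every directional shift of A becomes "rotate a chain of cells by one".
-- # Each circulation loop is four cell chains (dest0, dest1, ..., source_tail);
-- # _pull walks a chain backward with a carried register, swapping as it goes,
-- # so each cell ends up with its successor's old value.  Like A, B mutates
-- # room_array in place and returns it.
-- def _pull(room_array, cells):
--     if len(cells) < 2:
--         return
--     r, c = cells[-1]
--     carry = room_array[r][c]
--     for r, c in reversed(cells[:-1]):
--         room_array[r][c], carry = carry, room_array[r][c]
--
--
-- def blow_aircleaning(R, C, clean_machine_index_list, room_array):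
--     top = clean_machine_index_list[0]
--     bottom = clean_machine_index_list[1]
--     # counter-clockwise (upper) loop
--     _pull(room_array, [(d, 0) for d in range(top - 1, -1, -1)])
--     _pull(room_array, [(0, l) for l in range(C)])
--     _pull(room_array, [(u, C - 1) for u in range(top + 1)])
--     _pull(room_array, [(top, r) for r in range(C - 1, 0, -1)])
--     room_array[top][1] = 0
--     # clockwise (lower) loop
--     _pull(room_array, [(u, 0) for u in range(bottom + 1, R)])
--     _pull(room_array, [(R - 1, l) for l in range(C)])
--     _pull(room_array, [(d, C - 1) for d in range(R - 1, bottom - 1, -1)])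
--     _pull(room_array, [(bottom, r) for r in range(C - 1, 0, -1)])
--     room_array[bottom][1] = 0
--     return room_array
-- ===== Notes on version B (the rewrite author's own statement) =====
-- stated objective: alternative
-- what changed: A performs eight bespoke directional copy loops, each walking toward the source and copying neighbour into cell; B expresses every shift as rotating an explicit chain of cells by one, with a single generic routine that walks each chain backward carrying a register and swapping.
-- outside the precondition, e.g. on blow_aircleaning(2, 1, [-2, -2], [[1, 1], [0, -2]]): A returns [[1, 0], [1, -2]], B returns [[1, 0], [0, -2]]
import Mathlib
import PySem

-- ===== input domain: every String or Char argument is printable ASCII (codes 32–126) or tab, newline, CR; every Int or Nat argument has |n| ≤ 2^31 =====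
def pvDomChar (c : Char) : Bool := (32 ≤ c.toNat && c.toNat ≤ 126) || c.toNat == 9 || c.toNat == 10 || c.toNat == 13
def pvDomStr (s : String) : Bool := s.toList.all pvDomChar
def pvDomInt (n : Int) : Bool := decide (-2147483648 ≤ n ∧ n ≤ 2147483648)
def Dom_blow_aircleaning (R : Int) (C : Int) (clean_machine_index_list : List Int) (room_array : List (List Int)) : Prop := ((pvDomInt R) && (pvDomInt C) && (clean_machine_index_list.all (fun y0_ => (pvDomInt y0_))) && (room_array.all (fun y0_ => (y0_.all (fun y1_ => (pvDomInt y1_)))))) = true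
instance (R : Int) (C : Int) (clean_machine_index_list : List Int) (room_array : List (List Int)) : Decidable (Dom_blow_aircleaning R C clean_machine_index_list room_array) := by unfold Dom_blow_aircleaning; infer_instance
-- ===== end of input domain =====

-- B replaces A's eight bespoke directional copy loops by a single generic
-- routine that rotates an explicit chain of cells by one, walking the chain
-- backward with a carried register and swapping as it goes; the two circulation
-- loops become eight data-driven cell chains plus the two zero writes.
-- Both A and B mutate room_array in place in Python; the equivalence proved here
-- is about the RETURN value.

-- ===== PORT A =====
-- grid cell addressing and read/write helpers shared by both ports, with Python's
-- negative-index wraparound (room_array[r][c] read / item assignment); out-of-range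
-- accesses (where Python raises, excluded by Pre_) read 0 / write nothing.
def pvCell (g : List (List Int)) (r c : Int) : Option (Nat × Nat) :=
  match PySem.List.pyIdx? g.length r with
  | some rn =>
    match PySem.List.pyIdx? (g.getD rn []).length c with
    | some cn => some (rn, cn)
    | none => none
  | none => none

def pvGet (g : List (List Int)) (r c : Int) : Int :=
  PySem.List.pyGetD (PySem.List.pyGetD g r []) c 0

def pvSet (g : List (List Int)) (r c : Int) (v : Int) : List (List Int) :=
  match pvCell g r c with
  | some rc => g.set rc.1 ((g.getD rc.1 []).set rc.2 v)
  | none => g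

def blow_aircleaning (R : Int) (C : Int) (clean_machine_index_list : List Int) (room_array : List (List Int)) : List (List Int) :=
  let top := PySem.List.pyGetD clean_machine_index_list 0 0
  let bottom := PySem.List.pyGetD clean_machine_index_list 1 0
  -- 반시계: 위 -> 아래
  let g1 := (PySem.List.pyRange (top-1) 0 (-1)).foldl (fun g d => pvSet g d 0 (pvGet g (d-1) 0)) room_array
  -- 오 -> 왼
  let g2 := (PySem.List.pyRange 0 (C-1) 1).foldl (fun g l => pvSet g 0 l (pvGet g 0 (l+1))) g1
  -- 아래 -> 위
  let g3 := (PySem.List.pyRange 0 top 1).foldl (fun g u => pvSet g u (C-1) (pvGet g (u+1) (C-1))) g2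
  -- 왼 -> 오
  let g4 := (PySem.List.pyRange (C-1) 1 (-1)).foldl (fun g r => pvSet g top r (pvGet g top (r-1))) g3
  let g5 := pvSet g4 top 1 0
  -- 시계: 아래 -> 위
  let g6 := (PySem.List.pyRange (bottom+1) (R-1) 1).foldl (fun g u => pvSet g u 0 (pvGet g (u+1) 0)) g5
  -- 오 -> 왼
  let g7 := (PySem.List.pyRange 0 (C-1) 1).foldl (fun g l => pvSet g (R-1) l (pvGet g (R-1) (l+1))) g6
  -- 위 -> 아래
  let g8 := (PySem.List.pyRange (R-1) bottom (-1)).foldl (fun g d => pvSet g d (C-1) (pvGet g (d-1) (C-1))) g7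
  -- 왼 -> 오
  let g9 := (PySem.List.pyRange (C-1) 1 (-1)).foldl (fun g r => pvSet g bottom r (pvGet g bottom (r-1))) g8
  pvSet g9 bottom 1 0

-- ===== PORT B =====
-- Source B's _pull: rotate a chain of cells by one, walking backward with a carry
def pvPull (g : List (List Int)) (cells : List (Int × Int)) : List (List Int) :=
  if cells.length < 2 then g
  else
    let t := PySem.List.pyGetD cells (-1) (0, 0)
    let carry := pvGet g t.1 t.2
    (cells.dropLast.reverse.foldl
      (fun (s : List (List Int) × Int) p => (pvSet s.1 p.1 p.2 s.2, pvGet s.1 p.1 p.2))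
      (g, carry)).1

def blow_aircleaning_alt (R : Int) (C : Int) (clean_machine_index_list : List Int) (room_array : List (List Int)) : List (List Int) :=
  let top := PySem.List.pyGetD clean_machine_index_list 0 0
  let bottom := PySem.List.pyGetD clean_machine_index_list 1 0
  -- counter-clockwise (upper) loop
  let g1 := pvPull room_array ((PySem.List.pyRange (top-1) (-1) (-1)).map (fun d => (d, (0:Int))))
  let g2 := pvPull g1 ((PySem.List.pyRange 0 C 1).map (fun l => ((0:Int), l)))
  let g3 := pvPull g2 ((PySem.List.pyRange 0 (top+1) 1).map (fun u => (u, C-1)))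
  let g4 := pvPull g3 ((PySem.List.pyRange (C-1) 0 (-1)).map (fun r => (top, r)))
  let g5 := pvSet g4 top 1 0
  -- clockwise (lower) loop
  let g6 := pvPull g5 ((PySem.List.pyRange (bottom+1) R 1).map (fun u => (u, (0:Int))))
  let g7 := pvPull g6 ((PySem.List.pyRange 0 C 1).map (fun l => (R-1, l)))
  let g8 := pvPull g7 ((PySem.List.pyRange (R-1) (bottom-1) (-1)).map (fun d => (d, C-1)))
  let g9 := pvPull g8 ((PySem.List.pyRange (C-1) 0 (-1)).map (fun r => (bottom, r)))
  pvSet g9 bottom 1 0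

-- ===== PRECONDITION & SPEC =====
def pvRowLen (g : List (List Int)) (r : Int) : Nat := (PySem.List.pyGetD g r []).length
-- i is a valid Python index into a sequence of length n
def pvValid (i : Int) (n : Nat) : Prop := -(n : Int) ≤ i ∧ i < (n : Int)

def pvPreAux (R C t b : Int) (g : List (List Int)) : Prop :=
  (b < R - 1 → 0 ≤ b) ∧
  (2 ≤ t → (t - 1 < (g.length : Int) ∧
    ∀ d ∈ PySem.List.pyRange (t-1) 0 (-1), 1 ≤ pvRowLen g d ∧ 1 ≤ pvRowLen g (d-1))) ∧
  (2 ≤ C → (1 ≤ g.length ∧ C ≤ (pvRowLen g 0 : Int))) ∧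
  (1 ≤ t → (t < (g.length : Int) ∧
    ∀ u ∈ PySem.List.pyRange 0 (t+1) 1, pvValid (C-1) (pvRowLen g u))) ∧
  (3 ≤ C → (pvValid t g.length ∧ C ≤ (pvRowLen g t : Int))) ∧
  (pvValid t g.length ∧ 2 ≤ pvRowLen g t) ∧
  (b + 1 < R - 1 → (-(g.length : Int) ≤ b + 1 ∧ R - 1 < (g.length : Int) ∧
    ∀ u ∈ PySem.List.pyRange (b+1) (R-1) 1, 1 ≤ pvRowLen g u ∧ 1 ≤ pvRowLen g (u+1))) ∧
  (2 ≤ C → (pvValid (R-1) g.length ∧ C ≤ (pvRowLen g (R-1) : Int))) ∧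
  (b < R - 1 → (-(g.length : Int) ≤ b ∧ R - 1 < (g.length : Int) ∧
    ∀ d ∈ PySem.List.pyRange (R-1) b (-1), pvValid (C-1) (pvRowLen g d) ∧ pvValid (C-1) (pvRowLen g (d-1)))) ∧
  (3 ≤ C → (pvValid b g.length ∧ C ≤ (pvRowLen g b : Int))) ∧
  (pvValid b g.length ∧ 2 ≤ pvRowLen g b)

-- Pre_ = the inputs on which A returns normally (every index access of its loops is
-- in range), minus one corner A returns on: a negative bottom index that still lets
-- the clockwise column loops run, where Python's negative-index wraparound makes the
-- same grid cell appear twice in one chain; on those nonsense cleaner positions A's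
-- forward copy order and B's backward carry order give two equally defensible
-- readings, and Pre_ excludes them ((b < R-1 → 0 ≤ b) below).
def Pre_blow_aircleaning (R : Int) (C : Int) (clean_machine_index_list : List Int) (room_array : List (List Int)) : Prop :=
  2 ≤ clean_machine_index_list.length ∧
  pvPreAux R C (PySem.List.pyGetD clean_machine_index_list 0 0)
    (PySem.List.pyGetD clean_machine_index_list 1 0) room_array

instance (R : Int) (C : Int) (clean_machine_index_list : List Int) (room_array : List (List Int)) : Decidable (Pre_blow_aircleaning R C clean_machine_index_list room_array) := by
  unfold Pre_blow_aircleaning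
  letI iv : ∀ (i : Int) (n : Nat), Decidable (pvValid i n) :=
    fun i n => by unfold pvValid; infer_instance
  letI : ∀ (R C t b : Int) (g : List (List Int)), Decidable (pvPreAux R C t b g) :=
    fun R C t b g => by unfold pvPreAux; infer_instance
  infer_instance

def pvWitness_blow_aircleaning : Int × Int × List Int × List (List Int) :=
  (4, 2, [1, 2], [[1, 2], [3, 4], [5, 6], [7, 8]])

def Spec_blow_aircleaning (R : Int) (C : Int) (clean_machine_index_list : List Int) (room_array : List (List Int)) (out : List (List Int)) : Prop := out = blow_aircleaning_alt R C clean_machine_index_list room_array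
instance (R : Int) (C : Int) (clean_machine_index_list : List Int) (room_array : List (List Int)) (out : List (List Int)) : Decidable (Spec_blow_aircleaning R C clean_machine_index_list room_array out) := by unfold Spec_blow_aircleaning; infer_instance

-- ===== CLAIM (what is proved, stated in full; the proofs are below) =====
def Claim_equal_blow_aircleaning : Prop := ∀ (R : Int) (C : Int) (clean_machine_index_list : List Int) (room_array : List (List Int)), Dom_blow_aircleaning R C clean_machine_index_list room_array → Pre_blow_aircleaning R C clean_machine_index_list room_array → Spec_blow_aircleaning R C clean_machine_index_list room_array (blow_aircleaning R C clean_machine_index_list room_array)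

-- ===== LEMMAS AND PROOFS =====
-- ---------- basic cell/grid lemmas ----------
lemma getD_set_ne' {α : Type} (l : List α) (i j : Nat) (x : α) (d : α) (h : i ≠ j) :
    (l.set i x).getD j d = l.getD j d := by
  simp [List.getD_eq_getElem?_getD, List.getElem?_set_ne h]

lemma getD_set_self' {α : Type} (l : List α) (i : Nat) (x : α) (d : α) (h : i < l.length) :
    (l.set i x).getD i d = x := by
  simp [List.getD_eq_getElem?_getD, List.getElem?_set_self h]

lemma pyIdx?_lt {n : Nat} {i : Int} {m : Nat} (h : PySem.List.pyIdx? n i = some m) : m < n := by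
  unfold PySem.List.pyIdx? at h
  split_ifs at h <;> simp_all <;> omega

lemma pyIdx?_nonneg {n : Nat} {i : Int} {m : Nat} (h0 : 0 ≤ i)
    (h : PySem.List.pyIdx? n i = some m) : m = i.toNat := by
  unfold PySem.List.pyIdx? at h
  split_ifs at h <;> simp_all

lemma pyIdx?_zero (c : Int) : PySem.List.pyIdx? 0 c = none := by
  unfold PySem.List.pyIdx?
  split_ifs <;> first | rfl | omega

lemma pvCell_some_elim {g : List (List Int)} {r c : Int} {rc : Nat × Nat}
    (h : pvCell g r c = some rc) :
    ∃ rn cn, PySem.List.pyIdx? g.length r = some rn ∧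
      PySem.List.pyIdx? (g.getD rn []).length c = some cn ∧ rc = (rn, cn) := by
  unfold pvCell at h
  cases e1 : PySem.List.pyIdx? g.length r with
  | none => rw [e1] at h; simp at h
  | some rn =>
    rw [e1] at h
    dsimp only at h
    cases e2 : PySem.List.pyIdx? (g.getD rn []).length c with
    | none => rw [e2] at h; simp at h
    | some cn =>
      rw [e2] at h
      simp only [Option.some.injEq] at h
      exact ⟨rn, cn, rfl, e2, h.symm⟩

lemma pvCell_row_lt {g : List (List Int)} {r c : Int} {rc : Nat × Nat}
    (h : pvCell g r c = some rc) : rc.1 < g.length := by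
  obtain ⟨rn, cn, e1, _, e3⟩ := pvCell_some_elim h
  subst e3
  exact pyIdx?_lt e1

lemma pvCell_fst {g : List (List Int)} {r c : Int} {rc : Nat × Nat}
    (h0 : 0 ≤ r) (h : pvCell g r c = some rc) : rc.1 = r.toNat := by
  obtain ⟨rn, cn, e1, _, e3⟩ := pvCell_some_elim h
  subst e3
  exact pyIdx?_nonneg h0 e1

lemma pyGetD_idx {α : Type} (xs : List α) (i : Int) (d : α) :
    PySem.List.pyGetD xs i d = match PySem.List.pyIdx? xs.length i with
      | some n => xs.getD n d
      | none => d := by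
  unfold PySem.List.pyGetD PySem.List.pyGet?
  cases h : PySem.List.pyIdx? xs.length i with
  | none => rfl
  | some n => simp [List.getD_eq_getElem?_getD]

lemma pvGet_eq_cell (g : List (List Int)) (r c : Int) :
    pvGet g r c = match pvCell g r c with
      | some rc => (g.getD rc.1 []).getD rc.2 0
      | none => 0 := by
  unfold pvGet pvCell
  rw [pyGetD_idx g r []]
  cases h1 : PySem.List.pyIdx? g.length r with
  | none =>
    rw [pyGetD_idx]
    simp [pyIdx?_zero]
  | some rn =>
    dsimp only
    rw [pyGetD_idx]
    cases h2 : PySem.List.pyIdx? (g.getD rn []).length c <;> rfl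

lemma pvSet_length (g : List (List Int)) (r c v : Int) : (pvSet g r c v).length = g.length := by
  unfold pvSet
  cases h : pvCell g r c <;> simp

lemma rowLen_pvSet (g : List (List Int)) (r c v : Int) (k : Nat) :
    ((pvSet g r c v).getD k []).length = (g.getD k []).length := by
  unfold pvSet
  cases h : pvCell g r c with
  | none => rfl
  | some rc =>
    by_cases hk : rc.1 = k
    · subst hk
      rw [getD_set_self' _ _ _ _ (pvCell_row_lt h)]
      simp
    · rw [getD_set_ne' _ _ _ _ _ hk]

lemma pvCell_pvSet (g : List (List Int)) (a b v r c : Int) :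
    pvCell (pvSet g a b v) r c = pvCell g r c := by
  unfold pvCell
  rw [pvSet_length]
  simp only [rowLen_pvSet]

lemma pvGet_pvSet_ne (g : List (List Int)) (a b v r c : Int)
    (h : pvCell g a b ≠ pvCell g r c ∨ pvCell g a b = none) :
    pvGet (pvSet g a b v) r c = pvGet g r c := by
  cases hab : pvCell g a b with
  | none => unfold pvSet; rw [hab]
  | some wc =>
    have hne : pvCell g r c ≠ some wc := by
      rcases h with h | h
      · rw [hab] at h; exact fun e => h e.symm
      · rw [hab] at h; simp at h
    rw [pvGet_eq_cell, pvGet_eq_cell, pvCell_pvSet]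
    cases hrc : pvCell g r c with
    | none => rfl
    | some rc =>
      have hrc_ne : rc ≠ wc := fun e => hne (by rw [hrc, e])
      dsimp only
      unfold pvSet
      rw [hab]
      dsimp only
      by_cases hr : wc.1 = rc.1
      · rw [hr, getD_set_self' _ _ _ _ (hr ▸ pvCell_row_lt hab)]
        have hc : wc.2 ≠ rc.2 := fun e => hrc_ne (Prod.ext hr e).symm
        exact getD_set_ne' _ _ _ _ _ hc
      · rw [getD_set_ne' _ _ _ _ _ hr]

lemma pvCell_ne_rows (g : List (List Int)) (r c r' c' : Int)
    (h0 : 0 ≤ r) (h0' : 0 ≤ r') (hne : r ≠ r') :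
    pvCell g r c ≠ pvCell g r' c' ∨ pvCell g r c = none := by
  cases hc : pvCell g r c with
  | none => exact Or.inr rfl
  | some rc =>
    left
    intro e
    cases hc' : pvCell g r' c' with
    | none => rw [hc'] at e; simp at e
    | some rc' =>
      rw [hc'] at e
      have e1 := pvCell_fst h0 hc
      have e2 := pvCell_fst h0' hc'
      injection e with e3
      subst e3
      omega

lemma pvCell_snd_of_same_row (g : List (List Int)) (r c c' : Int) (rc rc' : Nat × Nat)
    (h0 : 0 ≤ c) (h0' : 0 ≤ c')
    (h : pvCell g r c = some rc) (h' : pvCell g r c' = some rc') : rc.2 = c.toNat ∧ rc'.2 = c'.toNat := by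
  obtain ⟨rn, cn, e1, e2, e3⟩ := pvCell_some_elim h
  obtain ⟨rn', cn', e1', e2', e3'⟩ := pvCell_some_elim h'
  have hr : rn = rn' := by rw [e1] at e1'; injection e1'
  subst e3; subst e3'; subst hr
  exact ⟨pyIdx?_nonneg h0 e2, pyIdx?_nonneg h0' e2'⟩

lemma pvCell_ne_cols (g : List (List Int)) (r c c' : Int)
    (h0 : 0 ≤ c) (h0' : 0 ≤ c') (hne : c ≠ c') :
    pvCell g r c ≠ pvCell g r c' ∨ pvCell g r c = none := by
  cases hc : pvCell g r c with
  | none => exact Or.inr rfl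
  | some rc =>
    left
    intro e
    cases hc' : pvCell g r c' with
    | none => rw [hc'] at e; simp at e
    | some rc' =>
      rw [hc'] at e
      obtain ⟨s1, s2⟩ := pvCell_snd_of_same_row g r c c' rc rc' h0 h0' hc hc'
      injection e with e3
      subst e3
      omega

-- writes to distinct cells commute
lemma pvSet_none (g : List (List Int)) (a b v : Int) (h : pvCell g a b = none) :
    pvSet g a b v = g := by
  unfold pvSet; rw [h]

lemma pvSet_some (g : List (List Int)) (a b v : Int) (p : Nat × Nat) (h : pvCell g a b = some p) :
    pvSet g a b v = g.set p.1 ((g.getD p.1 []).set p.2 v) := by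
  unfold pvSet; rw [h]

lemma pvSet_comm (g : List (List Int)) (a b v c d w : Int)
    (h : pvCell g a b ≠ pvCell g c d ∨ pvCell g a b = none ∨ pvCell g c d = none) :
    pvSet (pvSet g a b v) c d w = pvSet (pvSet g c d w) a b v := by
  cases h1 : pvCell g a b with
  | none =>
    rw [pvSet_none g a b v h1, pvSet_none _ a b v (by rw [pvCell_pvSet]; exact h1)]
  | some p =>
    cases h2 : pvCell g c d with
    | none =>
      rw [pvSet_none g c d w h2, pvSet_none _ c d w (by rw [pvCell_pvSet]; exact h2)]
    | some q =>
      have hpq : p ≠ q := by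
        rcases h with h | h | h
        · intro e; exact h (by rw [h1, h2, e])
        · rw [h1] at h; simp at h
        · rw [h2] at h; simp at h
      have hL : pvSet (pvSet g a b v) c d w
          = (pvSet g a b v).set q.1 (((pvSet g a b v).getD q.1 []).set q.2 w) :=
        pvSet_some _ _ _ _ _ (by rw [pvCell_pvSet]; exact h2)
      have hR : pvSet (pvSet g c d w) a b v
          = (pvSet g c d w).set p.1 (((pvSet g c d w).getD p.1 []).set p.2 v) :=
        pvSet_some _ _ _ _ _ (by rw [pvCell_pvSet]; exact h1)
      rw [hL, hR, pvSet_some g a b v p h1, pvSet_some g c d w q h2]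
      by_cases hrow : p.1 = q.1
      · have hcol : p.2 ≠ q.2 := fun e => hpq (Prod.ext hrow e)
        have hlt : p.1 < g.length := pvCell_row_lt h1
        rw [← hrow]
        rw [getD_set_self' _ _ _ _ hlt, getD_set_self' _ _ _ _ hlt]
        rw [List.set_set, List.set_set, List.set_comm _ _ hcol]
      · rw [getD_set_ne' _ _ _ _ _ (fun e => hrow e.symm),
          getD_set_ne' _ _ _ _ _ (fun e => hrow e)]
        rw [List.set_comm _ _ hrow]


lemma pw_gt_neg_one (a b : Int) : (PySem.List.pyRange a b (-1)).Pairwise (· > ·) := by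
  rw [PySem.List.pyRange_neg_one_eq_reverse]
  exact List.pairwise_reverse.mpr (PySem.List.pairwise_lt_pyRange_one _ _)

-- two coordinate pairs that address distinct cells in EVERY grid (or fall out of range)
def pvC3 (z : List (List Int)) (p q : Int × Int) : Prop :=
  pvCell z p.1 p.2 ≠ pvCell z q.1 q.2 ∨ pvCell z p.1 p.2 = none ∨ pvCell z q.1 q.2 = none

lemma pvGet_of_cell_none {g : List (List Int)} {r c : Int} (h : pvCell g r c = none) :
    pvGet g r c = 0 := by
  rw [pvGet_eq_cell, h]

lemma pvGet_pvSet_ne3 (g : List (List Int)) (a b v r c : Int)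
    (h : pvC3 g (a, b) (r, c)) :
    pvGet (pvSet g a b v) r c = pvGet g r c := by
  rcases h with h | h | h
  · exact pvGet_pvSet_ne g a b v r c (Or.inl h)
  · exact pvGet_pvSet_ne g a b v r c (Or.inr h)
  · rw [pvGet_of_cell_none h, pvGet_of_cell_none (by rw [pvCell_pvSet]; exact h)]

-- ---------- write-list semantics ----------
def runW (g : List (List Int)) (W : List ((Int × Int) × Int)) : List (List Int) :=
  W.foldl (fun h q => pvSet h q.1.1 q.1.2 q.2) g

lemma runW_append (g : List (List Int)) (W1 W2 : List ((Int × Int) × Int)) :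
    runW g (W1 ++ W2) = runW (runW g W1) W2 :=
  List.foldl_append

lemma pvGet_runW_ne3 (g : List (List Int)) (W : List ((Int × Int) × Int)) (r c : Int)
    (h : ∀ q ∈ W, pvC3 g q.1 (r, c)) :
    pvGet (runW g W) r c = pvGet g r c := by
  induction W generalizing g with
  | nil => rfl
  | cons q W ih =>
    rw [runW, List.foldl_cons, ← runW]
    rw [ih _ (fun p hp => by
      have := h p (List.mem_cons_of_mem _ hp)
      simpa [pvC3, pvCell_pvSet] using this)]
    exact pvGet_pvSet_ne3 g _ _ _ _ _ (h q (List.mem_cons_self))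

-- an in-place shift pass whose later reads never hit earlier writes equals
-- the same writes with all values snapshotted up front
lemma pass_eq_runW (w s : Int → Int × Int) (idx : List Int) (g : List (List Int))
    (hs : idx.Pairwise (fun i j => pvC3 g (w i) (s j))) :
    idx.foldl (fun h i => pvSet h (w i).1 (w i).2 (pvGet h (s i).1 (s i).2)) g
      = runW g (idx.map (fun i => (w i, pvGet g (s i).1 (s i).2))) := by
  induction idx generalizing g with
  | nil => rfl
  | cons i0 rest ih =>
    rw [List.foldl_cons, List.map_cons, runW, List.foldl_cons, ← runW]
    have hg' := ih (pvSet g (w i0).1 (w i0).2 (pvGet g (s i0).1 (s i0).2))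
      (by
        refine hs.of_cons.imp_of_mem ?_
        intro a b _ _ hab
        simpa [pvC3, pvCell_pvSet] using hab)
    rw [hg']
    congr 1
    apply List.map_congr_left
    intro j hj
    have := List.rel_of_pairwise_cons hs hj
    rw [pvGet_pvSet_ne3 g _ _ _ _ _ this]

-- write order is irrelevant when all destinations are distinct cells
lemma runW_perm (g : List (List Int)) (W1 W2 : List ((Int × Int) × Int))
    (hp : W1.Perm W2)
    (hnd : (W1.map (·.1)).Nodup)
    (h3 : ∀ x ∈ W1, ∀ y ∈ W1, x.1 ≠ y.1 → ∀ z, pvC3 z x.1 y.1) :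
    runW g W1 = runW g W2 := by
  refine hp.foldl_eq' ?_ g
  intro x hx y hy z
  by_cases hxy : x = y
  · subst hxy; rfl
  · have hne : x.1 ≠ y.1 := fun e => hxy (List.inj_on_of_nodup_map hnd hx hy e)
    have h := h3 x hx y hy hne z
    exact pvSet_comm z _ _ _ _ _ _ (by simpa [pvC3] using h)

-- ---------- consecutive (cell, successor) pairs of a chain ----------
lemma zc_pyRange_one (a b : Int) :
    (PySem.List.pyRange a b 1).zip (PySem.List.pyRange a b 1).tail
      = (PySem.List.pyRange a (b-1) 1).map (fun i => (i, i+1)) := by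
  obtain ⟨n, hn⟩ : ∃ n, (b - a).toNat = n := ⟨_, rfl⟩
  induction n generalizing a with
  | zero =>
    rw [PySem.List.pyRange_one_eq_nil (by omega), PySem.List.pyRange_one_eq_nil (by omega)]
    rfl
  | succ n ih =>
    have hab : a < b := by omega
    by_cases h2 : a + 1 < b
    · rw [PySem.List.pyRange_one_cons hab, PySem.List.pyRange_one_cons h2, List.tail_cons,
        List.zip_cons_cons, ← PySem.List.pyRange_one_cons h2,
        show PySem.List.pyRange (a+1+1) b 1 = (PySem.List.pyRange (a+1) b 1).tail from by
          rw [PySem.List.pyRange_one_cons h2]; rfl,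
        ih (a+1) (by omega),
        PySem.List.pyRange_one_cons (show a < b - 1 by omega), List.map_cons]
    · rw [PySem.List.pyRange_one_cons hab,
        PySem.List.pyRange_one_eq_nil (show b ≤ a + 1 by omega),
        PySem.List.pyRange_one_eq_nil (show b - 1 ≤ a by omega)]
      rfl

lemma zc_pyRange_neg_one (a b : Int) :
    (PySem.List.pyRange a b (-1)).zip (PySem.List.pyRange a b (-1)).tail
      = (PySem.List.pyRange a (b+1) (-1)).map (fun i => (i, i-1)) := by
  obtain ⟨n, hn⟩ : ∃ n, (a - b).toNat = n := ⟨_, rfl⟩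
  induction n generalizing a with
  | zero =>
    rw [PySem.List.pyRange_neg_one_eq_nil (by omega), PySem.List.pyRange_neg_one_eq_nil (by omega)]
    rfl
  | succ n ih =>
    have hab : b < a := by omega
    by_cases h2 : b < a - 1
    · rw [PySem.List.pyRange_neg_one_cons hab, PySem.List.pyRange_neg_one_cons h2, List.tail_cons,
        List.zip_cons_cons, ← PySem.List.pyRange_neg_one_cons h2,
        show PySem.List.pyRange (a-1-1) b (-1) = (PySem.List.pyRange (a-1) b (-1)).tail from by
          rw [PySem.List.pyRange_neg_one_cons h2]; rfl,
        ih (a-1) (by omega),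
        PySem.List.pyRange_neg_one_cons (show b + 1 < a by omega), List.map_cons]
    · rw [PySem.List.pyRange_neg_one_cons hab,
        PySem.List.pyRange_neg_one_eq_nil (show a - 1 ≤ b by omega),
        PySem.List.pyRange_neg_one_eq_nil (show a ≤ b + 1 by omega)]
      rfl

-- ---------- Source B's _pull as a snapshot write list, written backward ----------
lemma pull_state (g : List (List Int)) (cells : List (Int × Int)) (hne : cells ≠ [])
    (hnd : cells.Nodup)
    (h3 : ∀ p ∈ cells, ∀ q ∈ cells, p ≠ q → ∀ z, pvC3 z p q) :
    cells.dropLast.reverse.foldl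
        (fun (s : List (List Int) × Int) p => (pvSet s.1 p.1 p.2 s.2, pvGet s.1 p.1 p.2))
        (g, pvGet g (cells.getLast hne).1 (cells.getLast hne).2)
      = (runW g (((cells.zip cells.tail).map (fun w => (w.1, pvGet g w.2.1 w.2.2))).reverse),
         pvGet g (cells.head hne).1 (cells.head hne).2) := by
  induction cells with
  | nil => simp at hne
  | cons p rest ih =>
    cases rest with
    | nil => rfl
    | cons q t =>
      have hne' : q :: t ≠ [] := by simp
      have hlast : (p :: q :: t).getLast hne = (q :: t).getLast hne' := by
        rw [List.getLast_cons]
      have ihr := ih hne' hnd.of_cons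
        (fun x hx y hy hxy => h3 x (List.mem_cons_of_mem _ hx) y (List.mem_cons_of_mem _ hy) hxy)
      rw [List.dropLast_cons₂, List.reverse_cons, List.foldl_append, hlast, ihr]
      have hpq : p ∉ q :: t := (List.nodup_cons.mp hnd).1
      have hget : pvGet (runW g ((((q :: t).zip (q :: t).tail).map
            (fun w => (w.1, pvGet g w.2.1 w.2.2))).reverse)) p.1 p.2 = pvGet g p.1 p.2 := by
        refine pvGet_runW_ne3 g _ _ _ ?_
        intro w hw
        rw [List.mem_reverse] at hw
        obtain ⟨z, hz, rfl⟩ := List.mem_map.mp hw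
        have hz1 := (List.of_mem_zip hz).1
        have : z.1 ≠ p := fun e => hpq (e ▸ hz1)
        have h := h3 z.1 (List.mem_cons_of_mem _ hz1) p List.mem_cons_self this g
        simpa [pvC3] using h
      simp only [List.foldl_cons, List.foldl_nil]
      rw [hget]
      refine Prod.ext ?_ rfl
      show pvSet (runW g _) p.1 p.2 (pvGet g q.1 q.2) = runW g _
      rw [show (p :: q :: t).tail = q :: t from rfl, List.zip_cons_cons, List.map_cons,
        List.reverse_cons, runW_append]
      rfl

lemma pull_eq (g : List (List Int)) (cells : List (Int × Int))
    (hnd : cells.Nodup)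
    (h3 : ∀ p ∈ cells, ∀ q ∈ cells, p ≠ q → ∀ z, pvC3 z p q) :
    pvPull g cells
      = runW g (((cells.zip cells.tail).map (fun w => (w.1, pvGet g w.2.1 w.2.2))).reverse) := by
  match cells with
  | [] => rfl
  | [_] => rfl
  | p :: q :: t =>
    have hne : p :: q :: t ≠ [] := by simp
    rw [pvPull, if_neg (by simp)]
    have hD : PySem.List.pyGetD (p :: q :: t) (-1) ((0:Int), (0:Int))
        = (p :: q :: t).getLast hne := PySem.List.pyGetD_neg_one _ _ hne
    calc (( (p :: q :: t).dropLast.reverse.foldl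
            (fun (s : List (List Int) × Int) x => (pvSet s.1 x.1 x.2 s.2, pvGet s.1 x.1 x.2))
            ((g, pvGet g (PySem.List.pyGetD (p :: q :: t) (-1) ((0:Int), (0:Int))).1
              (PySem.List.pyGetD (p :: q :: t) (-1) ((0:Int), (0:Int))).2))).1)
        = (( (p :: q :: t).dropLast.reverse.foldl
            (fun (s : List (List Int) × Int) x => (pvSet s.1 x.1 x.2 s.2, pvGet s.1 x.1 x.2))
            ((g, pvGet g ((p :: q :: t).getLast hne).1 ((p :: q :: t).getLast hne).2))).1) := by
          rw [hD]
      _ = runW g ((((p :: q :: t).zip (p :: q :: t).tail).map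
            (fun w => (w.1, pvGet g w.2.1 w.2.2))).reverse) := by
          rw [pull_state g (p :: q :: t) hne hnd h3]

-- ---------- nodup of an injectively mapped range ----------
lemma nodup_map_range_one {β : Type} (f : Int → β) (hf : Function.Injective f) (a b : Int) :
    ((PySem.List.pyRange a b 1).map f).Nodup := by
  refine (PySem.List.nodup_pyRange_one a b).map ?_
  intro i j h
  exact hf h

lemma nodup_map_range_neg_one {β : Type} (f : Int → β) (hf : Function.Injective f) (a b : Int) :
    ((PySem.List.pyRange a b (-1)).map f).Nodup := by
  rw [PySem.List.pyRange_neg_one_eq_reverse, List.map_reverse]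
  exact List.nodup_reverse.mpr (nodup_map_range_one f hf _ _)

-- ---------- one directional shift = one chain rotation ----------
-- descending loop: A writes f i ← old f (i-1) for i = a, a-1, ..., b+1;
-- B rotates the chain [f a, f (a-1), ..., f (b-1+1)] (one cell longer) by one
lemma chain_desc (g : List (List Int)) (f : Int → Int × Int) (a b : Int)
    (hinj : Function.Injective f)
    (H : ∀ i j : Int, b - 1 < i → i ≤ a → b - 1 < j → j ≤ a → i ≠ j → ∀ z, pvC3 z (f i) (f j)) :
    (PySem.List.pyRange a b (-1)).foldl
        (fun h i => pvSet h (f i).1 (f i).2 (pvGet h (f (i-1)).1 (f (i-1)).2)) g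
      = pvPull g ((PySem.List.pyRange a (b-1) (-1)).map f) := by
  have hW : ((((PySem.List.pyRange a (b-1) (-1)).map f).zip
        ((PySem.List.pyRange a (b-1) (-1)).map f).tail).map
        (fun w => (w.1, pvGet g w.2.1 w.2.2)))
      = (PySem.List.pyRange a b (-1)).map (fun i => (f i, pvGet g (f (i-1)).1 (f (i-1)).2)) := by
    rw [← List.map_tail, List.zip_map, zc_pyRange_neg_one, List.map_map, List.map_map]
    rw [show b - 1 + 1 = b by ring]
    rfl
  have hA := pass_eq_runW (fun i => f i) (fun i => f (i-1)) (PySem.List.pyRange a b (-1)) g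
    (by
      refine (pw_gt_neg_one a b).imp_of_mem ?_
      intro i j hi hj hij
      rw [PySem.List.mem_pyRange_neg_one] at hi hj
      exact H i (j-1) (by omega) (by omega) (by omega) (by omega) (by omega) g)
  rw [hA, pull_eq g _ (nodup_map_range_neg_one f hinj _ _)
      (by
        intro p hp q hq hpq z
        obtain ⟨i, hi, rfl⟩ := List.mem_map.mp hp
        obtain ⟨j, hj, rfl⟩ := List.mem_map.mp hq
        rw [PySem.List.mem_pyRange_neg_one] at hi hj
        exact H i j (by omega) (by omega) (by omega) (by omega) (fun e => hpq (by rw [e])) z),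
    hW]
  refine runW_perm g _ _ (List.reverse_perm _).symm ?_ ?_
  · rw [List.map_map]
    exact nodup_map_range_neg_one _ (fun i j h => hinj h) _ _
  · intro x hx y hy hxy z
    obtain ⟨i, hi, rfl⟩ := List.mem_map.mp hx
    obtain ⟨j, hj, rfl⟩ := List.mem_map.mp hy
    rw [PySem.List.mem_pyRange_neg_one] at hi hj
    exact H i j (by omega) (by omega) (by omega) (by omega)
      (fun e => hxy (by rw [e])) z

-- ascending loop: A writes f i ← old f (i+1) for i = a, a+1, ..., b-1
lemma chain_asc (g : List (List Int)) (f : Int → Int × Int) (a b : Int)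
    (hinj : Function.Injective f)
    (H : ∀ i j : Int, a ≤ i → i < b + 1 → a ≤ j → j < b + 1 → i ≠ j → ∀ z, pvC3 z (f i) (f j)) :
    (PySem.List.pyRange a b 1).foldl
        (fun h i => pvSet h (f i).1 (f i).2 (pvGet h (f (i+1)).1 (f (i+1)).2)) g
      = pvPull g ((PySem.List.pyRange a (b+1) 1).map f) := by
  have hW : ((((PySem.List.pyRange a (b+1) 1).map f).zip
        ((PySem.List.pyRange a (b+1) 1).map f).tail).map
        (fun w => (w.1, pvGet g w.2.1 w.2.2)))
      = (PySem.List.pyRange a b 1).map (fun i => (f i, pvGet g (f (i+1)).1 (f (i+1)).2)) := by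
    rw [← List.map_tail, List.zip_map, zc_pyRange_one, List.map_map, List.map_map]
    rw [show b + 1 - 1 = b by ring]
    rfl
  have hA := pass_eq_runW (fun i => f i) (fun i => f (i+1)) (PySem.List.pyRange a b 1) g
    (by
      refine (PySem.List.pairwise_lt_pyRange_one a b).imp_of_mem ?_
      intro i j hi hj hij
      rw [PySem.List.mem_pyRange_one] at hi hj
      exact H i (j+1) (by omega) (by omega) (by omega) (by omega) (by omega) g)
  rw [hA, pull_eq g _ (nodup_map_range_one f hinj _ _)
      (by
        intro p hp q hq hpq z
        obtain ⟨i, hi, rfl⟩ := List.mem_map.mp hp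
        obtain ⟨j, hj, rfl⟩ := List.mem_map.mp hq
        rw [PySem.List.mem_pyRange_one] at hi hj
        exact H i j (by omega) (by omega) (by omega) (by omega) (fun e => hpq (by rw [e])) z),
    hW]
  refine runW_perm g _ _ (List.reverse_perm _).symm ?_ ?_
  · rw [List.map_map]
    exact nodup_map_range_one _ (fun i j h => hinj h) _ _
  · intro x hx y hy hxy z
    obtain ⟨i, hi, rfl⟩ := List.mem_map.mp hx
    obtain ⟨j, hj, rfl⟩ := List.mem_map.mp hy
    rw [PySem.List.mem_pyRange_one] at hi hj
    exact H i j (by omega) (by omega) (by omega) (by omega)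
      (fun e => hxy (by rw [e])) z

-- the two chain shapes: a fixed row (distinct nonnegative columns) and a fixed
-- column (distinct nonnegative rows)
lemma H_col (y : Int) (lo : Int) (hlo : 0 ≤ lo) :
    ∀ i j : Int, lo ≤ i → lo ≤ j → i ≠ j → ∀ z : List (List Int),
      pvC3 z (i, y) (j, y) := by
  intro i j hi hj hij z
  exact (pvCell_ne_rows z i y j y (by omega) (by omega) hij).imp id Or.inl

lemma H_row (x : Int) (lo : Int) (hlo : 0 ≤ lo) :
    ∀ i j : Int, lo ≤ i → lo ≤ j → i ≠ j → ∀ z : List (List Int),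
      pvC3 z (x, i) (x, j) := by
  intro i j hi hj hij z
  exact (pvCell_ne_cols z x i j (by omega) (by omega) hij).imp id Or.inl

lemma inj_col (y : Int) : Function.Injective (fun i : Int => (i, y)) :=
  fun _ _ h => congrArg Prod.fst h

lemma inj_row (x : Int) : Function.Injective (fun i : Int => (x, i)) :=
  fun _ _ h => congrArg Prod.snd h

-- ===== VERDICT (by name: the statement is the Claim_ definition above) =====
theorem blow_aircleaning_spec : Claim_equal_blow_aircleaning := by
  intro R C cml room _hdom hpre
  obtain ⟨hlen, haux⟩ := hpre
  have hcorner := haux.1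
  unfold Spec_blow_aircleaning
  show blow_aircleaning R C cml room = blow_aircleaning_alt R C cml room
  unfold blow_aircleaning blow_aircleaning_alt
  dsimp only
  set top := PySem.List.pyGetD cml 0 0 with htop
  set bottom := PySem.List.pyGetD cml 1 0 with hbottom
  -- seg1: column 0, rows top-1 .. 1 pulled from above
  have e1 : ∀ g : List (List Int),
      (PySem.List.pyRange (top-1) 0 (-1)).foldl (fun g d => pvSet g d 0 (pvGet g (d-1) 0)) g
        = pvPull g ((PySem.List.pyRange (top-1) (-1) (-1)).map (fun d => (d, (0:Int)))) := by
    intro g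
    have := chain_desc g (fun d => (d, (0:Int))) (top-1) 0 (inj_col 0)
      (fun i j hi _ hj _ hij z => H_col 0 0 le_rfl i j (by omega) (by omega) hij z)
    rw [show (0:Int) - 1 = -1 by ring] at this
    exact this
  -- seg2: row 0, cols 0 .. C-2 pulled from the right
  have e2 : ∀ g : List (List Int),
      (PySem.List.pyRange 0 (C-1) 1).foldl (fun g l => pvSet g 0 l (pvGet g 0 (l+1))) g
        = pvPull g ((PySem.List.pyRange 0 C 1).map (fun l => ((0:Int), l))) := by
    intro g
    have := chain_asc g (fun l => ((0:Int), l)) 0 (C-1) (inj_row 0)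
      (fun i j hi _ hj _ hij z => H_row 0 0 le_rfl i j (by omega) (by omega) hij z)
    rw [show C - 1 + 1 = C by ring] at this
    exact this
  -- seg3: column C-1, rows 0 .. top-1 pulled from below
  have e3 : ∀ g : List (List Int),
      (PySem.List.pyRange 0 top 1).foldl (fun g u => pvSet g u (C-1) (pvGet g (u+1) (C-1))) g
        = pvPull g ((PySem.List.pyRange 0 (top+1) 1).map (fun u => (u, C-1))) :=
    fun g => chain_asc g (fun u => (u, C-1)) 0 top (inj_col (C-1))
      (fun i j hi _ hj _ hij z => H_col (C-1) 0 le_rfl i j (by omega) (by omega) hij z)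
  -- seg4: row top, cols C-1 .. 2 pulled from the left
  have e4 : ∀ g : List (List Int),
      (PySem.List.pyRange (C-1) 1 (-1)).foldl (fun g r => pvSet g top r (pvGet g top (r-1))) g
        = pvPull g ((PySem.List.pyRange (C-1) 0 (-1)).map (fun r => (top, r))) := by
    intro g
    have := chain_desc g (fun r => (top, r)) (C-1) 1 (inj_row top)
      (fun i j hi _ hj _ hij z => H_row top 0 le_rfl i j (by omega) (by omega) hij z)
    rw [show (1:Int) - 1 = 0 by ring] at this
    exact this
  -- seg5: column 0, rows bottom+1 .. R-2 pulled from below (corner: 0 ≤ bottom)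
  have e5 : ∀ g : List (List Int),
      (PySem.List.pyRange (bottom+1) (R-1) 1).foldl (fun g u => pvSet g u 0 (pvGet g (u+1) 0)) g
        = pvPull g ((PySem.List.pyRange (bottom+1) R 1).map (fun u => (u, (0:Int)))) := by
    intro g
    have := chain_asc g (fun u => (u, (0:Int))) (bottom+1) (R-1) (inj_col 0)
      (fun i j hi hi2 hj hj2 hij z => by
        have hb0 : 0 ≤ bottom := hcorner (by omega)
        exact H_col 0 (bottom+1) (by omega) i j (by omega) (by omega) hij z)
    rw [show R - 1 + 1 = R by ring] at this
    exact this
  -- seg6: row R-1, cols 0 .. C-2 pulled from the right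
  have e6 : ∀ g : List (List Int),
      (PySem.List.pyRange 0 (C-1) 1).foldl (fun g l => pvSet g (R-1) l (pvGet g (R-1) (l+1))) g
        = pvPull g ((PySem.List.pyRange 0 C 1).map (fun l => (R-1, l))) := by
    intro g
    have := chain_asc g (fun l => (R-1, l)) 0 (C-1) (inj_row (R-1))
      (fun i j hi _ hj _ hij z => H_row (R-1) 0 le_rfl i j (by omega) (by omega) hij z)
    rw [show C - 1 + 1 = C by ring] at this
    exact this
  -- seg7: column C-1, rows R-1 .. bottom+1 pulled from above (corner: 0 ≤ bottom)
  have e7 : ∀ g : List (List Int),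
      (PySem.List.pyRange (R-1) bottom (-1)).foldl (fun g d => pvSet g d (C-1) (pvGet g (d-1) (C-1))) g
        = pvPull g ((PySem.List.pyRange (R-1) (bottom-1) (-1)).map (fun d => (d, C-1))) := by
    intro g
    exact chain_desc g (fun d => (d, C-1)) (R-1) bottom (inj_col (C-1))
      (fun i j hi hi2 hj hj2 hij z => by
        have hb0 : 0 ≤ bottom := by
          by_cases hc : bottom < R - 1
          · exact hcorner hc
          · omega
        exact H_col (C-1) bottom hb0 i j (by omega) (by omega) hij z)
  -- seg8: row bottom, cols C-1 .. 2 pulled from the left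
  have e8 : ∀ g : List (List Int),
      (PySem.List.pyRange (C-1) 1 (-1)).foldl (fun g r => pvSet g bottom r (pvGet g bottom (r-1))) g
        = pvPull g ((PySem.List.pyRange (C-1) 0 (-1)).map (fun r => (bottom, r))) := by
    intro g
    have := chain_desc g (fun r => (bottom, r)) (C-1) 1 (inj_row bottom)
      (fun i j hi _ hj _ hij z => H_row bottom 0 le_rfl i j (by omega) (by omega) hij z)
    rw [show (1:Int) - 1 = 0 by ring] at this
    exact this
  rw [e1, e2, e3, e4, e5, e6, e7, e8]
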